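-- pv_equiv track=rewrite | github.com/sueszli/vector-database-benchmark | dataset/python-mutated/substitutions.py | parse
-- ===== SOURCE A (Python) =====
-- def parse(s):
--     if False:
--         i = 10
--         return i + 15
--     "\n        Parses s according to Ren'Py string formatting rules. Returns a list\n        of (literal_text, field_name, format, replacement) tuples, just like\n        the method we're overriding.\n        "
--     LITERAL = 0
--     OPEN_BRACKET = 1
--     VALUE = 3
--     FORMAT = 4
--     CONVERSION = 5
--     bracket_depth = 0
--     literal = ''
--     value = ''
--     format = ''
--     conversion = None
--     state = LITERAL
--     for c in s:
--         if state == LITERAL: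
--             if c == '[':
--                 state = OPEN_BRACKET
--                 continue
--             else:
--                 literal += c
--                 continue
--         elif state == OPEN_BRACKET:
--             if c == '[':
--                 literal += c
--                 state = LITERAL
--                 continue
--             else:
--                 value = c
--                 state = VALUE
--                 bracket_depth = 0
--                 continue
--         elif state == VALUE:
--             if c == '[':
--                 bracket_depth += 1
--                 value += c
--                 continue
--             elif c == ']':
--                 if bracket_depth:
--                     bracket_depth -= 1
--                     value += c
--                     continue
--                 else:
--                     yield (literal, value, format, conversion)
--                     state = LITERAL
--                     literal = ''
--                     value = ''
--                     format = ''
--                     conversion = None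
--                     continue
--             elif c == ':':
--                 state = FORMAT
--                 continue
--             elif c == '!':
--                 state = CONVERSION
--                 conversion = ''
--                 continue
--             else:
--                 value += c
--                 continue
--         elif state == FORMAT:
--             if c == ']':
--                 yield (literal, value, format, conversion)
--                 state = LITERAL
--                 literal = ''
--                 value = ''
--                 format = ''
--                 conversion = None
--                 continue
--             elif c == '!':
--                 state = CONVERSION
--                 conversion = ''
--                 continue
--             else:
--                 format += c
--                 continue
--         elif state == CONVERSION:
--             if c == ']':
--                 yield (literal, value, format, conversion)
--                 state = LITERAL
--                 literal = ''
--                 value = ''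
--                 format = ''
--                 conversion = None
--                 continue
--             else:
--                 conversion += c
--                 continue
--     if state != LITERAL:
--         raise Exception('String {0!r} ends with an open format operation.'.format(s))
--     if literal:
--         yield (literal, None, None, None)
-- ===== SOURCE B (Python) =====
-- def _conversion(s, i, value, fmt):
--     n = len(s)
--     parts = []
--     while i < n:
--         c = s[i]
--         i += 1
--         if c == ']':
--             return i, value, fmt, ''.join(parts)
--         parts.append(c)
--     raise Exception('String {0!r} ends with an open format operation.'.format(s))
--
--
-- def _format(s, i, value):
--     n = len(s)
--     parts = []
--     while i < n:
--         c = s[i]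
--         i += 1
--         if c == ']':
--             return i, value, ''.join(parts), None
--         elif c == '!':
--             return _conversion(s, i, value, ''.join(parts))
--         else:
--             parts.append(c)
--     raise Exception('String {0!r} ends with an open format operation.'.format(s))
--
--
-- def _field(s, i):
--     # called just past the opening '['; the first character is taken verbatim
--     n = len(s)
--     if i >= n:
--         raise Exception('String {0!r} ends with an open format operation.'.format(s))
--     parts = [s[i]]
--     i += 1
--     depth = 0
--     while i < n:
--         c = s[i]
--         i += 1
--         if c == '[':
--             depth += 1
--             parts.append(c)
--         elif c == ']':
--             if depth:
--                 depth -= 1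
--                 parts.append(c)
--             else:
--                 return i, ''.join(parts), '', None
--         elif c == ':':
--             return _format(s, i, ''.join(parts))
--         elif c == '!':
--             return _conversion(s, i, ''.join(parts), '')
--         else:
--             parts.append(c)
--     raise Exception('String {0!r} ends with an open format operation.'.format(s))
--
--
-- def parse(s):
--     n = len(s)
--     i = 0
--     lit = []
--     while i < n:
--         c = s[i]
--         if c != '[':
--             lit.append(c)
--             i += 1
--         elif i + 1 < n and s[i + 1] == '[':
--             lit.append('[')
--             i += 2
--         else:
--             i, value, fmt, conv = _field(s, i + 1)
--             yield (''.join(lit), value, fmt, conv)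
--             lit = []
--     if lit:
--         yield (''.join(lit), None, None, None)
-- ===== Notes on version B (the rewrite author's own statement) =====
-- stated objective: alternative
-- what changed: Replaces A's single character-at-a-time five-state state machine (state variable + buffers mutated per character) with an index-based scanner: an outer literal loop that on '[' dispatches to dedicated helper parsers for the value, format and conversion parts of a field, each consuming its own run of characters.
import Mathlib
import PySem

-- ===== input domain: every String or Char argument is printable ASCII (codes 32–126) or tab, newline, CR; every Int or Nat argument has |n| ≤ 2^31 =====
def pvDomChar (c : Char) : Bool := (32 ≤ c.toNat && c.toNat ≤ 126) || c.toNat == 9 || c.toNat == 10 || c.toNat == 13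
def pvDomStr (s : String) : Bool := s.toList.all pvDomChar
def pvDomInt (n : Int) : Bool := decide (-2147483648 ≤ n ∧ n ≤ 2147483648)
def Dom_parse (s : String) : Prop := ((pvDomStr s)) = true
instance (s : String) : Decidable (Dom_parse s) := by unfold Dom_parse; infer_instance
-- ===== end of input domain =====

-- B rewrites A's five-state one-character state machine as an index-free scanner: an outer
-- literal loop plus three helper parsers (value / format / conversion) per field; same output,
-- same cost (objective: alternative decomposition).
-- Both Pythons RAISE on strings that end inside an unclosed field; Pre_parse excludes exactly
-- those, and on them both ports return the tuples yielded before the exception.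

-- ===== PORT A =====
-- literal transliteration of A's for-loop: state ∈ {0 LITERAL, 1 OPEN_BRACKET, 3 VALUE, 4 FORMAT, 5 CONVERSION}
def parseEntry (lit val fmt : List Char) (conv : Option (List Char)) :
    String × Option String × Option String × Option String :=
  (String.mk lit, some (String.mk val), some (String.mk fmt), conv.map String.mk)

def parseLoop (cs : List Char) (state : Nat) (depth : Nat) (lit val fmt : List Char)
    (conv : Option (List Char))
    (acc : List (String × Option String × Option String × Option String)) :
    List (String × Option String × Option String × Option String) :=
  match cs with
  | [] =>
      if state ≠ 0 then acc   -- Python raises here; the port returns the tuples yielded so far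
      else if lit ≠ [] then acc ++ [(String.mk lit, none, none, none)]
      else acc
  | c :: rest =>
      if state = 0 then
        if c = '[' then parseLoop rest 1 depth lit val fmt conv acc
        else parseLoop rest 0 depth (lit ++ [c]) val fmt conv acc
      else if state = 1 then
        if c = '[' then parseLoop rest 0 depth (lit ++ [c]) val fmt conv acc
        else parseLoop rest 3 0 lit [c] fmt conv acc
      else if state = 3 then
        if c = '[' then parseLoop rest 3 (depth + 1) lit (val ++ [c]) fmt conv acc
        else if c = ']' then
          if depth ≠ 0 then parseLoop rest 3 (depth - 1) lit (val ++ [c]) fmt conv acc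
          else parseLoop rest 0 depth [] [] [] none (acc ++ [parseEntry lit val fmt conv])
        else if c = ':' then parseLoop rest 4 depth lit val fmt conv acc
        else if c = '!' then parseLoop rest 5 depth lit val fmt (some []) acc
        else parseLoop rest 3 depth lit (val ++ [c]) fmt conv acc
      else if state = 4 then
        if c = ']' then parseLoop rest 0 depth [] [] [] none (acc ++ [parseEntry lit val fmt conv])
        else if c = '!' then parseLoop rest 5 depth lit val fmt (some []) acc
        else parseLoop rest 4 depth lit val (fmt ++ [c]) conv acc
      else -- state = 5 (CONVERSION)
        if c = ']' then parseLoop rest 0 depth [] [] [] none (acc ++ [parseEntry lit val fmt conv])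
        else parseLoop rest 5 depth lit val fmt (conv.map (· ++ [c])) acc

def parse (s : String) : List (String × Option String × Option String × Option String) :=
  parseLoop s.toList 0 0 [] [] [] none []

-- ===== PORT B =====
-- literal transliteration of Source B: _conversion / _format / _field helpers + outer literal loop;
-- 'none' as a helper result = the Python helper raises.

def bConv (cs : List Char) (value fmt parts : List Char) :
    Option ((List Char × List Char × List Char) × List Char) :=
  match cs with
  | [] => none
  | c :: rest =>
      if c = ']' then some ((value, fmt, parts), rest)
      else bConv rest value fmt (parts ++ [c])

def bFormat (cs : List Char) (value parts : List Char) :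
    Option ((List Char × List Char × Option (List Char)) × List Char) :=
  match cs with
  | [] => none
  | c :: rest =>
      if c = ']' then some ((value, parts, none), rest)
      else if c = '!' then
        (bConv rest value parts []).map (fun p => ((p.1.1, p.1.2.1, some p.1.2.2), p.2))
      else bFormat rest value (parts ++ [c])

def bValue (cs : List Char) (depth : Nat) (parts : List Char) :
    Option ((List Char × List Char × Option (List Char)) × List Char) :=
  match cs with
  | [] => none
  | c :: rest =>
      if c = '[' then bValue rest (depth + 1) (parts ++ [c])
      else if c = ']' then
        if depth ≠ 0 then bValue rest (depth - 1) (parts ++ [c])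
        else some ((parts, [], none), rest)
      else if c = ':' then bFormat rest parts []
      else if c = '!' then
        (bConv rest parts [] []).map (fun p => ((p.1.1, p.1.2.1, some p.1.2.2), p.2))
      else bValue rest depth (parts ++ [c])

-- _field: called just past '['; first character taken verbatim
def bField (cs : List Char) :
    Option ((List Char × List Char × Option (List Char)) × List Char) :=
  match cs with
  | [] => none
  | c :: rest => bValue rest 0 [c]

-- size lemmas used only for bLoop's termination
theorem bConv_len {cs value fmt parts r res} (h : bConv cs value fmt parts = some (res, r)) :
    r.length < cs.length := by
  induction cs generalizing parts with
  | nil => simp [bConv] at h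
  | cons c rest ih =>
      simp only [bConv] at h
      split at h
      · cases h; simp
      · exact Nat.lt_trans (ih h) (by simp)

theorem bFormat_len {cs value parts r res} (h : bFormat cs value parts = some (res, r)) :
    r.length < cs.length := by
  induction cs generalizing parts with
  | nil => simp [bFormat] at h
  | cons c rest ih =>
      simp only [bFormat] at h
      split at h
      · cases h; simp
      · split at h
        · rcases Option.map_eq_some_iff.mp h with ⟨⟨_, r'⟩, hb, he⟩
          cases he
          exact Nat.lt_trans (bConv_len hb) (by simp)
        · exact Nat.lt_trans (ih h) (by simp)

theorem bValue_len {cs depth parts r res} (h : bValue cs depth parts = some (res, r)) :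
    r.length < cs.length := by
  induction cs generalizing depth parts with
  | nil => simp [bValue] at h
  | cons c rest ih =>
      simp only [bValue] at h
      split at h
      · exact Nat.lt_trans (ih h) (by simp)
      · split at h
        · split at h
          · exact Nat.lt_trans (ih h) (by simp)
          · cases h; simp
        · split at h
          · exact Nat.lt_trans (bFormat_len h) (by simp)
          · split at h
            · rcases Option.map_eq_some_iff.mp h with ⟨⟨_, r'⟩, hb, he⟩
              cases he
              exact Nat.lt_trans (bConv_len hb) (by simp)
            · exact Nat.lt_trans (ih h) (by simp)

theorem bField_len {cs r res} (h : bField cs = some (res, r)) : r.length < cs.length := by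
  cases cs with
  | nil => simp [bField] at h
  | cons c rest => exact Nat.lt_trans (bValue_len h) (by simp)

def bLoop (cs : List Char) (lit : List Char) :
    List (String × Option String × Option String × Option String) :=
  match cs with
  | [] => if lit ≠ [] then [(String.mk lit, none, none, none)] else []
  | c :: rest =>
      if c ≠ '[' then bLoop rest (lit ++ [c])
      else if rest.head? = some '[' then bLoop rest.tail (lit ++ ['['])
      else
        match hf : bField rest with
        | none => []   -- Python raises here
        | some ((v, f, cv), r) =>
            (String.mk lit, some (String.mk v), some (String.mk f), cv.map String.mk)
              :: bLoop r []
termination_by cs.length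
decreasing_by
  · simp
  · simp [List.length_tail]
  · exact Nat.lt_trans (bField_len hf) (by simp)

def parse_alt (s : String) : List (String × Option String × Option String × Option String) :=
  bLoop s.toList []

-- ===== PRECONDITION & SPEC =====
-- Pre_parse: the strings on which Python A RETURNS (does not raise "ends with an open format
-- operation").  It is a minimal well-formedness automaton over the input — merged FORMAT/
-- CONVERSION state, no buffers, no output — not a copy of either port:
-- 0 = outside any field, 1 = just after '[', 2 = in format/conversion, 3+d = in value at depth d.
def preStep (st : Nat) (c : Char) : Nat :=
  if st = 0 then (if c = '[' then 1 else 0)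
  else if st = 1 then (if c = '[' then 0 else 3)
  else if st = 2 then (if c = ']' then 0 else 2)
  else
    if c = '[' then st + 1
    else if c = ']' then (if st = 3 then 0 else st - 1)
    else if c = ':' ∨ c = '!' then 2
    else st

def Pre_parse (s : String) : Prop := s.toList.foldl preStep 0 = 0
instance (s : String) : Decidable (Pre_parse s) := by unfold Pre_parse; infer_instance

def pvWitness_parse : String := "Hi [name:>5]! [[x]] [a!r]"

def Spec_parse (s : String) (out : List (String × Option String × Option String × Option String)) : Prop := out = parse_alt s
instance (s : String) (out : List (String × Option String × Option String × Option String)) : Decidable (Spec_parse s out) := by unfold Spec_parse; infer_instance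

-- ===== CLAIM (what is proved, stated in full; the proofs are below) =====
def Claim_equal_parse : Prop := ∀ (s : String), Dom_parse s → Pre_parse s → Spec_parse s (parse s)

-- ===== LEMMAS AND PROOFS =====

-- A's LITERAL and OPEN_BRACKET states never read bracket_depth before resetting it
theorem parseLoop_depth01 (cs : List Char) (st : Nat) (hst : st = 0 ∨ st = 1)
    (d₁ d₂ : Nat) (lit : List Char) (acc) :
    parseLoop cs st d₁ lit [] [] none acc = parseLoop cs st d₂ lit [] [] none acc := by
  induction cs generalizing st lit with
  | nil => rcases hst with h | h <;> subst h <;> rfl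
  | cons c rest ih =>
      rcases hst with h | h <;> subst h
      · by_cases hc : c = '['
        · subst hc
          simp only [parseLoop]
          norm_num
          exact ih 1 (Or.inr rfl) _
        · simp only [parseLoop]
          norm_num [hc]
          exact ih 0 (Or.inl rfl) _
      · by_cases hc : c = '['
        · subst hc
          simp only [parseLoop]
          norm_num
          exact ih 0 (Or.inl rfl) _
        · simp [parseLoop, hc]

theorem parseLoop_depth (cs : List Char) (d₁ d₂ : Nat) (lit : List Char) (acc) :
    parseLoop cs 0 d₁ lit [] [] none acc = parseLoop cs 0 d₂ lit [] [] none acc :=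
  parseLoop_depth01 cs 0 (Or.inl rfl) d₁ d₂ lit acc

theorem lemConv (cs : List Char) (d : Nat) (lit val fmt conv : List Char) (acc) :
    parseLoop cs 5 d lit val fmt (some conv) acc =
      match bConv cs val fmt conv with
      | none => acc
      | some ((v, f, cv), r) =>
          parseLoop r 0 0 [] [] [] none (acc ++ [parseEntry lit v f (some cv)]) := by
  induction cs generalizing conv with
  | nil => rfl
  | cons c rest ih =>
      by_cases hc : c = ']'
      · subst hc
        simp only [parseLoop, bConv]
        norm_num [parseLoop_depth rest d 0]
      · simp only [parseLoop, bConv, if_neg hc]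
        norm_num [hc, ih]

theorem lemFmt (cs : List Char) (d : Nat) (lit val fmt : List Char) (acc) :
    parseLoop cs 4 d lit val fmt none acc =
      match bFormat cs val fmt with
      | none => acc
      | some ((v, f, cv), r) =>
          parseLoop r 0 0 [] [] [] none (acc ++ [parseEntry lit v f cv]) := by
  induction cs generalizing fmt with
  | nil => rfl
  | cons c rest ih =>
      by_cases hc : c = ']'
      · subst hc
        simp only [parseLoop, bFormat]
        norm_num [parseLoop_depth rest d 0]
      · by_cases hb : c = '!'
        · subst hb
          simp only [parseLoop, bFormat]
          norm_num
          rw [lemConv]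
          cases h : bConv rest val fmt [] with
          | none => simp
          | some p => rcases p with ⟨⟨v, f, cv⟩, r⟩; simp
        · simp only [parseLoop, bFormat]
          norm_num [hc, hb]
          exact ih _

theorem lemVal (cs : List Char) (d : Nat) (lit val : List Char) (acc) :
    parseLoop cs 3 d lit val [] none acc =
      match bValue cs d val with
      | none => acc
      | some ((v, f, cv), r) =>
          parseLoop r 0 0 [] [] [] none (acc ++ [parseEntry lit v f cv]) := by
  induction cs generalizing d val with
  | nil => rfl
  | cons c rest ih =>
      by_cases hob : c = '['
      · subst hob
        simp only [parseLoop, bValue]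
        norm_num
        exact ih _ _
      · by_cases hcb : c = ']'
        · subst hcb
          simp only [parseLoop, bValue]
          norm_num [hob]
          by_cases hd : d = 0
          · subst hd
            norm_num
          · norm_num [hd]
            exact ih _ _
        · by_cases hcolon : c = ':'
          · subst hcolon
            simp only [parseLoop, bValue]
            norm_num [hob, hcb]
            exact lemFmt rest d lit val [] acc
          · by_cases hbang : c = '!'
            · subst hbang
              simp only [parseLoop, bValue]
              norm_num [hob, hcb]
              rw [lemConv]
              cases h : bConv rest val [] [] with
              | none => simp
              | some p => rcases p with ⟨⟨v, f, cv⟩, r⟩; simp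
            · simp only [parseLoop, bValue]
              norm_num [hob, hcb, hcolon, hbang]
              exact ih _ _

theorem lemLit (n : Nat) (cs : List Char) (hn : cs.length ≤ n) (d : Nat) (lit : List Char) (acc) :
    parseLoop cs 0 d lit [] [] none acc = acc ++ bLoop cs lit := by
  induction n generalizing cs d lit acc with
  | zero =>
      have : cs = [] := List.length_eq_zero_iff.mp (Nat.le_zero.mp hn)
      subst this
      by_cases h : lit = [] <;> simp [parseLoop, bLoop, h]
  | succ n ih =>
      cases cs with
      | nil => by_cases h : lit = [] <;> simp [parseLoop, bLoop, h]
      | cons c rest =>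
          by_cases hc : c = '['
          · subst hc
            cases rest with
            | nil => simp [parseLoop, bLoop, bField]
            | cons c2 rest2 =>
                by_cases h2 : c2 = '['
                · subst h2
                  simp only [parseLoop, bLoop]
                  norm_num
                  exact ih rest2 (by simp at hn ⊢; omega) _ _ _
                · simp only [parseLoop, bLoop]
                  norm_num [h2]
                  rw [show (3 : Nat) = 3 from rfl]
                  rw [lemVal rest2 0 lit [c2] acc]
                  simp only [bField]
                  cases h : bValue rest2 0 [c2] with
                  | none => simp
                  | some p =>
                      rcases p with ⟨⟨v, f, cv⟩, r⟩
                      have hr : r.length ≤ n := by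
                        have := bValue_len h
                        simp at hn
                        omega
                      simp only [h]
                      rw [ih r hr 0 [] (acc ++ [parseEntry lit v f cv])]
                      simp [parseEntry]
          · simp only [parseLoop, bLoop]
            norm_num [hc]
            exact ih rest (by simp at hn; omega) _ _ _

theorem parse_eq_alt (s : String) : parse s = parse_alt s := by
  simpa [parse, parse_alt] using lemLit s.toList.length s.toList le_rfl 0 [] []

-- ===== VERDICT (by name: the statement is the Claim_ definition above) =====
theorem parse_spec : Claim_equal_parse := by
  intro s _ _
  unfold Spec_parse
  exact parse_eq_alt s
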